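-- pv_equiv track=rewrite | github.com/Sonika-19/PARR-MHQA | run.py | _build_title_to_contexts
-- ===== SOURCE A (Python) =====
-- from collections import defaultdict
-- from typing import List
--
-- def _build_title_to_contexts(chunks: List[dict]) -> dict:
--     mapping = defaultdict(list)
--     for chunk in chunks:
--         title = str(chunk.get("title", "")).strip()
--         text = str(chunk.get("text", "")).strip()
--         if not title or not text:
--             continue
--         if len(mapping[title]) < 5:
--             mapping[title].append(text)
--     return dict(mapping)
-- ===== SOURCE B (Python) =====
-- from typing import List
--
-- def _build_title_to_contexts(chunks: List[dict]) -> dict: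
--     pairs = []
--     for chunk in chunks:
--         title = str(chunk.get("title", "")).strip()
--         text = str(chunk.get("text", "")).strip()
--         if title and text:
--             pairs.append((title, text))
--     result = {}
--     for title, _ in pairs:
--         if title not in result:
--             result[title] = [x for t, x in pairs if t == title][:5]
--     return result
-- ===== Notes on version B (the rewrite author's own statement) =====
-- stated objective: alternative
-- what changed: B first flattens the chunks into a list of valid (title, text) pairs, then for each first-occurrence title re-scans that pair list to collect its texts and slices off the first five, instead of A's single pass that grows capped lists in a dict as it goes.
import Mathlib
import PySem

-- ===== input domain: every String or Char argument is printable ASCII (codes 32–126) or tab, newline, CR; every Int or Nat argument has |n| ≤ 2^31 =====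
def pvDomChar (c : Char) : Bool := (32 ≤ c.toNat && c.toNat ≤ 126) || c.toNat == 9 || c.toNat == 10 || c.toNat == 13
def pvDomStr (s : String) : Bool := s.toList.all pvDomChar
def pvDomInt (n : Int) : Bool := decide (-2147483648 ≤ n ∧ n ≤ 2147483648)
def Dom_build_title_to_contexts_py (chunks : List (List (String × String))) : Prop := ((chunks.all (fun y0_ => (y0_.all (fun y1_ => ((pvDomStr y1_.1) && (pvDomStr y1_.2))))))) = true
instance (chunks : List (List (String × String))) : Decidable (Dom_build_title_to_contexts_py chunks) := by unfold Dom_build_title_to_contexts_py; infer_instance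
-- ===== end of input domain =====

-- B flattens chunks to a list of valid (title, text) pairs, then builds each first-occurrence title's entry by re-scanning that list and taking the first five (alternative decomposition; not faster).


-- ===== PORT A =====
-- shared helper: str(chunk.get(key, "")).strip() (values are strings, so str() is the identity)
def pvField (chunk : List (String × String)) (key : String) : String :=
  PySem.Str.strip ((PySem.Dict.ofList chunk).getD key "")

-- A: one pass over chunks; a dict of lists grown in place, each append guarded by the < 5 cap
def build_title_to_contexts_py (chunks : List (List (String × String))) : List (String × List String) :=
  (chunks.foldl (fun m chunk =>
      let title := pvField chunk "title"
      let text := pvField chunk "text"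
      if title = "" ∨ text = "" then m
      else if (m.getD title []).length < 5 then m.insert title (m.getD title [] ++ [text]) else m)
    PySem.Dict.empty).items

-- ===== PORT B =====
-- B: pass 1 collects the valid (title, text) pairs; pass 2, at each title's first occurrence,
-- re-scans the pair list for that title's texts and keeps the first five
def build_title_to_contexts_py_alt (chunks : List (List (String × String))) : List (String × List String) :=
  let pairs := chunks.foldl (fun ps chunk =>
      let title := pvField chunk "title"
      let text := pvField chunk "text"
      if title ≠ "" ∧ text ≠ "" then ps ++ [(title, text)] else ps) []
  (pairs.foldl (fun r p =>
      if r.contains p.1 then r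
      else r.insert p.1 (((pairs.filter (fun q => q.1 == p.1)).map Prod.snd).take 5))
    PySem.Dict.empty).items

-- ===== PRECONDITION & SPEC =====
def Spec_build_title_to_contexts_py (chunks : List (List (String × String))) (out : List (String × List String)) : Prop := out = build_title_to_contexts_py_alt chunks
instance (chunks : List (List (String × String))) (out : List (String × List String)) : Decidable (Spec_build_title_to_contexts_py chunks out) := by unfold Spec_build_title_to_contexts_py; infer_instance

-- ===== CLAIM (what is proved, stated in full; the proofs are below) =====
def Claim_equal_build_title_to_contexts_py : Prop := ∀ (chunks : List (List (String × String))), Dom_build_title_to_contexts_py chunks → Spec_build_title_to_contexts_py chunks (build_title_to_contexts_py chunks)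

-- ===== LEMMAS AND PROOFS =====

-- the valid pairs extracted from the chunks
def pvPairs (chunks : List (List (String × String))) : List (String × String) :=
  chunks.filterMap (fun chunk =>
    let title := pvField chunk "title"
    let text := pvField chunk "text"
    if title ≠ "" ∧ text ≠ "" then some (title, text) else none)

-- first five texts for title t in the pair list ps
def pvTexts (ps : List (String × String)) (t : String) : List String :=
  ((ps.filter (fun q => q.1 == t)).map Prod.snd).take 5

-- the common normal form of both results
def pvCanon (ps : List (String × String)) : List (String × List String) :=
  (PySem.Set.ofList (ps.map Prod.fst)).map (fun t => (t, pvTexts ps t))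

-- A's per-pair step
def pvStepA (m : PySem.Dict String (List String)) (p : String × String) : PySem.Dict String (List String) :=
  if (m.getD p.1 []).length < 5 then m.insert p.1 (m.getD p.1 [] ++ [p.2]) else m

lemma pv_pairs_loop (chunks : List (List (String × String))) (acc : List (String × String)) :
    chunks.foldl (fun ps chunk =>
      let title := pvField chunk "title"
      let text := pvField chunk "text"
      if title ≠ "" ∧ text ≠ "" then ps ++ [(title, text)] else ps) acc
    = acc ++ pvPairs chunks := by
  induction chunks generalizing acc with
  | nil => simp [pvPairs]
  | cons c rest ih =>
    simp only [List.foldl_cons, pvPairs, List.filterMap_cons]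
    by_cases h : pvField c "title" ≠ "" ∧ pvField c "text" ≠ ""
    · simp only [if_pos h, ih, pvPairs]; simp
    · simp only [if_neg h, ih, pvPairs]

lemma pv_A_on_pairs (chunks : List (List (String × String))) (m : PySem.Dict String (List String)) :
    chunks.foldl (fun m chunk =>
      let title := pvField chunk "title"
      let text := pvField chunk "text"
      if title = "" ∨ text = "" then m
      else if (m.getD title []).length < 5 then m.insert title (m.getD title [] ++ [text]) else m) m
    = (pvPairs chunks).foldl pvStepA m := by
  induction chunks generalizing m with
  | nil => simp [pvPairs]
  | cons c rest ih =>
    simp only [List.foldl_cons, pvPairs, List.filterMap_cons]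
    by_cases h : pvField c "title" ≠ "" ∧ pvField c "text" ≠ ""
    · rw [if_neg (by tauto : ¬ (pvField c "title" = "" ∨ pvField c "text" = "")), if_pos h]
      simp only [List.foldl_cons]
      exact ih _
    · rw [if_pos (by tauto), if_neg h]
      exact ih _

lemma pv_canon_keys (ps : List (String × String)) :
    (pvCanon ps).map Prod.fst = PySem.Set.ofList (ps.map Prod.fst) := by
  simp [pvCanon, Function.comp_def]

lemma pv_filter_append_self (qs : List (String × String)) (t : String) (x : String) :
    (qs ++ [(t, x)]).filter (fun q => q.1 == t) = qs.filter (fun q => q.1 == t) ++ [(t, x)] := by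
  simp [List.filter_append]

lemma pv_filter_append_ne (qs : List (String × String)) {t t' : String} (x : String) (h : t' ≠ t) :
    (qs ++ [(t, x)]).filter (fun q => q.1 == t') = qs.filter (fun q => q.1 == t') := by
  simp [List.filter_append, (by simpa using h.symm : ¬ (t = t'))]

lemma pv_texts_append_self (qs : List (String × String)) (t x : String) :
    pvTexts (qs ++ [(t, x)]) t = ((qs.filter (fun q => q.1 == t)).map Prod.snd ++ [x]).take 5 := by
  unfold pvTexts
  rw [pv_filter_append_self, List.map_append]
  rfl

lemma pv_texts_append_ne (qs : List (String × String)) {t t' : String} (x : String) (h : t' ≠ t) :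
    pvTexts (qs ++ [(t, x)]) t' = pvTexts qs t' := by
  simp [pvTexts, pv_filter_append_ne qs x h]

-- A's loop from the empty dict computes the normal form
lemma pv_A_canon (ps : List (String × String)) :
    (ps.foldl pvStepA PySem.Dict.empty).items = pvCanon ps := by
  induction ps using List.reverseRecOn with
  | nil => simp [pvCanon, PySem.Set.ofList_nil]; rfl
  | append_singleton qs p ih =>
    obtain ⟨t, x⟩ := p
    rw [List.foldl_append]
    set d := qs.foldl pvStepA PySem.Dict.empty with hd
    have hkeys : d.keys = PySem.Set.ofList (qs.map Prod.fst) := by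
      simp only [PySem.Dict.keys, ih]; exact pv_canon_keys qs
    have hnd : d.keys.Nodup := by rw [hkeys]; exact PySem.Set.nodup_ofList _
    have hset : PySem.Set.ofList ((qs ++ [(t, x)]).map Prod.fst)
        = PySem.Set.add (PySem.Set.ofList (qs.map Prod.fst)) t := by
      rw [List.map_append]; exact PySem.Set.ofList_append_singleton _ _
    by_cases ht : t ∈ PySem.Set.ofList (qs.map Prod.fst)
    · -- title already present
      have hmem : (t, pvTexts qs t) ∈ d.items := by
        rw [ih]; exact List.mem_map.mpr ⟨t, ht, rfl⟩
      have hgetD : d.getD t [] = pvTexts qs t := PySem.Dict.getD_of_mem_items d hmem hnd []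
      have hcont : d.contains t = true :=
        (PySem.Dict.contains_iff_mem_keys d t).mpr (by rw [hkeys]; exact ht)
      have hsetadd : PySem.Set.ofList ((qs ++ [(t, x)]).map Prod.fst)
          = PySem.Set.ofList (qs.map Prod.fst) := by
        rw [hset]; exact PySem.Set.add_of_mem ht
      set full := (qs.filter (fun q => q.1 == t)).map Prod.snd with hfull
      have htexts : pvTexts qs t = full.take 5 := rfl
      by_cases hlen : full.length < 5
      · have htake : full.take 5 = full := List.take_of_length_le (by omega)
        have hlt : (d.getD t []).length < 5 := by rw [hgetD, htexts, htake]; exact hlen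
        show (pvStepA d (t, x)).items = _
        rw [pvStepA, if_pos hlt, PySem.Dict.items_insert_of_contains _ _ hcont, ih]
        unfold pvCanon
        rw [hsetadd, List.map_map]
        refine List.map_congr_left (fun t' ht' => ?_)
        by_cases he : t' = t
        · subst he
          simp only [Function.comp_apply, beq_self_eq_true, if_pos]
          rw [hgetD, htexts, htake, pv_texts_append_self]
          rw [List.take_of_length_le (by simp [hfull] at hlen ⊢; omega)]
        · simp only [Function.comp_apply]
          rw [if_neg (by simpa using he), pv_texts_append_ne qs x he]
      · have hlt : ¬ (d.getD t []).length < 5 := by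
          rw [hgetD, htexts, List.length_take]; omega
        show (pvStepA d (t, x)).items = _
        rw [pvStepA, if_neg hlt, ih]
        unfold pvCanon
        rw [hsetadd]
        refine List.map_congr_left (fun t' ht' => ?_)
        by_cases he : t' = t
        · subst he
          rw [pv_texts_append_self, htexts, ← hfull,
            List.take_append_of_le_length (by omega)]
        · rw [pv_texts_append_ne qs x he]
    · -- new title
      have hcont : d.contains t = false := by
        cases hc : d.contains t
        · rfl
        · exact absurd (by rw [← hkeys]; exact (PySem.Dict.contains_iff_mem_keys d t).mp hc) ht
      have hfilt : qs.filter (fun q => q.1 == t) = [] := by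
        rw [List.filter_eq_nil_iff]
        intro q hq
        simp only [beq_iff_eq]
        intro he
        exact ht ((PySem.Set.mem_ofList _ t).mpr (List.mem_map.mpr ⟨q, hq, he⟩))
      have hgetD : d.getD t [] = [] := PySem.Dict.getD_of_not_contains d [] hcont
      have hlt : (d.getD t []).length < 5 := by rw [hgetD]; simp
      show (pvStepA d (t, x)).items = _
      rw [pvStepA, if_pos hlt, PySem.Dict.items_insert_of_not_contains _ _ hcont, ih, hgetD]
      unfold pvCanon
      rw [hset, PySem.Set.add_of_not_mem ht, List.map_append]
      congr 1
      · refine List.map_congr_left (fun t' ht' => ?_)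
        rw [pv_texts_append_ne qs x (fun he => ht (by rw [← he]; exact ht'))]
      · simp [pvTexts, List.filter_append, hfilt]

-- B's loop from the empty dict computes the normal form of `full` restricted to ps's keys
lemma pv_B_canon (full : List (String × String)) (ps : List (String × String)) :
    (ps.foldl (fun r p =>
        if r.contains p.1 then r
        else r.insert p.1 (((full.filter (fun q => q.1 == p.1)).map Prod.snd).take 5))
      PySem.Dict.empty).items
    = (PySem.Set.ofList (ps.map Prod.fst)).map (fun t => (t, pvTexts full t)) := by
  induction ps using List.reverseRecOn with
  | nil => simp [PySem.Set.ofList_nil]; rfl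
  | append_singleton qs p ih =>
    obtain ⟨t, x⟩ := p
    rw [List.foldl_append]
    set d := qs.foldl (fun r p =>
        if r.contains p.1 then r
        else r.insert p.1 (((full.filter (fun q => q.1 == p.1)).map Prod.snd).take 5))
      PySem.Dict.empty with hd
    have hkeys : d.keys = PySem.Set.ofList (qs.map Prod.fst) := by
      simp only [PySem.Dict.keys, ih, List.map_map]
      simp [Function.comp_def]
    have hset : PySem.Set.ofList ((qs ++ [(t, x)]).map Prod.fst)
        = PySem.Set.add (PySem.Set.ofList (qs.map Prod.fst)) t := by
      rw [List.map_append]; exact PySem.Set.ofList_append_singleton _ _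
    by_cases ht : t ∈ PySem.Set.ofList (qs.map Prod.fst)
    · have hcont : d.contains t = true :=
        (PySem.Dict.contains_iff_mem_keys d t).mpr (by rw [hkeys]; exact ht)
      simp only [List.foldl_cons, List.foldl_nil, hcont, if_pos]
      rw [ih, hset, PySem.Set.add_of_mem ht]
    · have hcont : d.contains t = false := by
        cases hc : d.contains t
        · rfl
        · exact absurd (by rw [← hkeys]; exact (PySem.Dict.contains_iff_mem_keys d t).mp hc) ht
      simp only [List.foldl_cons, List.foldl_nil, hcont, Bool.false_eq_true, if_false]
      rw [PySem.Dict.items_insert_of_not_contains _ _ hcont, ih, hset,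
        PySem.Set.add_of_not_mem ht, List.map_append]
      rfl

-- ===== VERDICT (by name: the statement is the Claim_ definition above) =====
theorem build_title_to_contexts_py_spec : Claim_equal_build_title_to_contexts_py := by
  intro chunks _
  unfold Spec_build_title_to_contexts_py build_title_to_contexts_py build_title_to_contexts_py_alt
  rw [pv_A_on_pairs, pv_A_canon, pv_pairs_loop, List.nil_append, pv_B_canon]
  rfl
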